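-- pv_equiv track=rewrite | github.com/CupOfKawfee/Gen_AI_Murder_Mystery | llm_pipeline/pdf_generator.py | _break_long_tokens
-- ===== SOURCE A (Python) =====
-- def _break_long_tokens(text: str, chunk: int = 30) -> str:
--     """
--     Prevent fpdf from needing to break words mid-token by inserting spaces
--     into extremely long tokens (e.g., URLs, hashes, long AI strings without spaces).
--     This allows wrapmode="WORD" without crashes or ugly mid-word splits.
--     """
--     def split_token(tok: str) -> str:
--         if len(tok) <= chunk:
--             return tok
--         return " ".join(tok[i:i + chunk] for i in range(0, len(tok), chunk))
--
--     parts = text.split(" ")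
--     parts = [split_token(p) for p in parts]
--     return " ".join(parts)
-- ===== SOURCE B (Python) =====
-- def _break_long_tokens(text: str, chunk: int = 30) -> str:
--     out = []
--     run = 0
--     for ch in text:
--         if ch == " ":
--             run = 0
--         else:
--             if run == chunk:
--                 out.append(" ")
--                 run = 0
--             run += 1
--         out.append(ch)
--     return "".join(out)
-- ===== Notes on version B (the rewrite author's own statement) =====
-- stated objective: alternative
-- what changed: Replaces the space-split / per-token slice-and-join pipeline with a single left-to-right character scan that tracks the run length of consecutive non-space characters and inserts a space whenever the run reaches chunk.
-- intended difference: For negative chunk on text containing a non-space character, A returns the text with every non-space character deleted (range with a negative step yields no slices, so each token joins to the empty string), while B returns the text unchanged - the intended behaviour, since with a nonpositive limit no token should be broken, let alone erased. — e.g. on _break_long_tokens("abc", -1): A returns "", B returns "abc"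
import Mathlib
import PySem

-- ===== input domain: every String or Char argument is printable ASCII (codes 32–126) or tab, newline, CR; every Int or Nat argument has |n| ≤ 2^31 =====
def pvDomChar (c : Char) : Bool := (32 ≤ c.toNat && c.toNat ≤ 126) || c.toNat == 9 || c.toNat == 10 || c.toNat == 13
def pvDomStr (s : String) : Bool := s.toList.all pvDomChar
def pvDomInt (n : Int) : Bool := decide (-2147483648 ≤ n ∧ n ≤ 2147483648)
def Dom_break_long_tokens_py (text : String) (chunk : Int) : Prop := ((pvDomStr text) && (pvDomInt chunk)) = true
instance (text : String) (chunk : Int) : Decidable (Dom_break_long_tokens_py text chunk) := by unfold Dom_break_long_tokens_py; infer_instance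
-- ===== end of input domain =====

-- B replaces A's space-split / per-token slice-and-join pipeline with a single character scan
-- keeping a run counter (objective: alternative decomposition, same O(n) cost).


-- ===== PORT A =====
-- split_token: if len(tok) <= chunk: tok else " ".join(tok[i:i+chunk] for i in range(0, len(tok), chunk))
def splitTokenA (chunk : Int) (tok : List Char) : List Char :=
  if (tok.length : Int) ≤ chunk then tok
  else PySem.Chars.join [' ']
    ((PySem.List.pyRange 0 (tok.length : Int) chunk).map
      (fun i => PySem.List.slice tok (some i) (some (i + chunk))))

def break_long_tokens_py (text : String) (chunk : Int) : String :=
  String.ofList (PySem.Chars.join [' ']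
    ((PySem.Chars.splitOn text.toList [' ']).map (splitTokenA chunk)))

-- ===== PORT B =====
def break_long_tokens_py_alt (text : String) (chunk : Int) : String :=
  String.ofList
    ((text.toList.foldl
      (fun (st : List Char × Int) c =>
        if c = ' ' then (st.1 ++ [c], 0)
        else if st.2 = chunk then (st.1 ++ [' ', c], 1)
        else (st.1 ++ [c], st.2 + 1))
      ([], 0)).1)

-- ===== PRECONDITION & SPEC =====
-- Pre_ excludes exactly the inputs on which A raises: chunk == 0 together with a non-space
-- character in text makes range(0, len(tok), 0) raise ValueError.
def Pre_break_long_tokens_py (text : String) (chunk : Int) : Prop :=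
  chunk ≠ 0 ∨ text.toList.all (fun c => c = ' ') = true
instance (text : String) (chunk : Int) : Decidable (Pre_break_long_tokens_py text chunk) := by
  unfold Pre_break_long_tokens_py; infer_instance
def pvWitness_break_long_tokens_py : String × Int := ("hello world", 3)

-- For negative chunk on text containing a non-space character, A returns the text with every
-- non-space character deleted (range with a negative step yields no slices, so each token
-- joins to the empty string), while B returns the text unchanged — the intended behaviour,
-- since with a nonpositive limit no token should be broken, let alone erased.
def D_break_long_tokens_py (text : String) (chunk : Int) : Prop :=
  chunk < 0 ∧ text.toList.any (fun c => c ≠ ' ') = true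
instance (text : String) (chunk : Int) : Decidable (D_break_long_tokens_py text chunk) := by
  unfold D_break_long_tokens_py; infer_instance

def Spec_break_long_tokens_py (text : String) (chunk : Int) (out : String) : Prop :=
  ¬ D_break_long_tokens_py text chunk → out = break_long_tokens_py_alt text chunk
instance (text : String) (chunk : Int) (out : String) : Decidable (Spec_break_long_tokens_py text chunk out) := by
  unfold Spec_break_long_tokens_py; infer_instance

def pvDiffWitness_break_long_tokens_py : String × Int := ("abc", -1)
def pvDiffWitnessOut_break_long_tokens_py : String × String := ("", "abc")

-- ===== CLAIM (what is proved, stated in full; the proofs are below) =====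
def Claim_unchanged_break_long_tokens_py : Prop := ∀ (text : String) (chunk : Int), Dom_break_long_tokens_py text chunk → Pre_break_long_tokens_py text chunk → Spec_break_long_tokens_py text chunk (break_long_tokens_py text chunk)
def Claim_changed_break_long_tokens_py : Prop := Dom_break_long_tokens_py (pvDiffWitness_break_long_tokens_py.1) (pvDiffWitness_break_long_tokens_py.2) ∧ Pre_break_long_tokens_py (pvDiffWitness_break_long_tokens_py.1) (pvDiffWitness_break_long_tokens_py.2) ∧ D_break_long_tokens_py (pvDiffWitness_break_long_tokens_py.1) (pvDiffWitness_break_long_tokens_py.2) ∧ break_long_tokens_py (pvDiffWitness_break_long_tokens_py.1) (pvDiffWitness_break_long_tokens_py.2) = pvDiffWitnessOut_break_long_tokens_py.1 ∧ break_long_tokens_py_alt (pvDiffWitness_break_long_tokens_py.1) (pvDiffWitness_break_long_tokens_py.2) = pvDiffWitnessOut_break_long_tokens_py.2 ∧ pvDiffWitnessOut_break_long_tokens_py.1 ≠ pvDiffWitnessOut_break_long_tokens_py.2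
def Claim_exact_break_long_tokens_py : Prop := ∀ (text : String) (chunk : Int), Dom_break_long_tokens_py text chunk → Pre_break_long_tokens_py text chunk → D_break_long_tokens_py text chunk → break_long_tokens_py text chunk ≠ break_long_tokens_py_alt text chunk

-- ===== LEMMAS AND PROOFS =====

def splitSp : List Char → List Char × List (List Char)
  | [] => ([], [])
  | c :: cs =>
    let p := splitSp cs
    if c = ' ' then ([], p.1 :: p.2) else (c :: p.1, p.2)

theorem go_eq (l : List Char) : ∀ (fuel : Nat), l.length < fuel → ∀ (cur : List Char) (acc : List (List Char)),
    PySem.Chars.splitOn.go [' '] fuel l cur acc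
      = acc.reverse ++ (cur.reverse ++ (splitSp l).1) :: (splitSp l).2 := by
  induction l with
  | nil =>
    intro fuel h cur acc
    cases fuel with
    | zero => omega
    | succ f => simp [PySem.Chars.splitOn.go, splitSp]
  | cons c cs ih =>
    intro fuel h cur acc
    cases fuel with
    | zero => simp at h
    | succ f =>
      by_cases hc : c = ' '
      · subst hc
        have hp : [' '].isPrefixOf (' ' :: cs) = true := by simp [List.isPrefixOf]
        simp only [PySem.Chars.splitOn.go, hp, if_pos, List.length_cons, List.length_nil, List.drop_succ_cons, List.drop_zero]
        rw [ih f (by simpa using h) [] ((cur.reverse) :: acc)]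
        simp [splitSp]
      · have hp : [' '].isPrefixOf (c :: cs) = false := by
          simp [List.isPrefixOf]; exact fun h => absurd h.symm hc
        simp only [PySem.Chars.splitOn.go, hp]
        rw [ih f (by simpa using h) (c :: cur) acc]
        simp [splitSp, hc]

theorem splitOn_eq (l : List Char) :
    PySem.Chars.splitOn l [' '] = (splitSp l).1 :: (splitSp l).2 := by
  have := go_eq l (l.length + 1) (by omega) [] []
  simpa [PySem.Chars.splitOn] using this

-- chunked join with capacity counter; k = chunk size (used with 1 ≤ k)
def jc (k : Nat) : List Char → Nat → List Char
  | [], _ => []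
  | c :: cs, 0 => ' ' :: c :: jc k cs (k - 1)
  | c :: cs, m + 1 => c :: jc k cs m

theorem jc_of_le (k : Nat) : ∀ (tok : List Char) (m : Nat), tok.length ≤ m → jc k tok m = tok := by
  intro tok
  induction tok with
  | nil => intro m _; rfl
  | cons c cs ih =>
    intro m h
    cases m with
    | zero => simp at h
    | succ m' => simp [jc, ih m' (by simpa using h)]

theorem jc_break (k : Nat) (hk : 1 ≤ k) : ∀ (tok : List Char) (m : Nat), m ≤ k → m < tok.length →
    jc k tok m = tok.take m ++ ' ' :: jc k (tok.drop m) k := by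
  intro tok
  induction tok with
  | nil => intro m _ h; simp at h
  | cons c cs ih =>
    intro m hmk h
    cases m with
    | zero =>
      obtain ⟨k', rfl⟩ : ∃ k', k = k' + 1 := ⟨k - 1, by omega⟩
      simp [jc]
    | succ m' =>
      simp only [jc, List.take_succ_cons, List.drop_succ_cons, List.cons_append]
      rw [ih m' (by omega) (by simpa using h)]

theorem pyRange_zero_singleton (b s : Int) (h0 : 0 < b) (hbs : b ≤ s) :
    PySem.List.pyRange 0 b s = [0] := by
  rw [PySem.List.pyRange_of_pos 0 b (by omega)]
  have h1 : (b + s - 1) / s = 1 := by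
    have hl : 1 ≤ (b + s - 1) / s := by
      rw [Int.le_ediv_iff_mul_le (by omega)]; omega
    have hu : (b + s - 1) / s < 2 := by
      rw [Int.ediv_lt_iff_lt_mul (by omega)]; omega
    omega
  simp [h0, h1]

theorem pyRange_zero_cons (b s : Int) (hs : 0 < s) (hsb : s < b) :
    PySem.List.pyRange 0 b s = 0 :: (PySem.List.pyRange 0 (b - s) s).map (· + s) := by
  rw [PySem.List.pyRange_of_pos 0 b (by omega), PySem.List.pyRange_of_pos 0 (b - s) (by omega)]
  have hb : (0:Int) < b - s := by omega
  have hb0 : (0:Int) < b := by omega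
  have hcnt : (b + s - 1) / s = (b - s + s - 1) / s + 1 := by
    have e : b + s - 1 = (b - s + s - 1) + 1 * s := by ring
    rw [e, Int.add_mul_ediv_right _ _ (by omega)]
  have hnn : 0 ≤ (b - s + s - 1) / s := Int.ediv_nonneg (by omega) (by omega)
  have htn : ((b + s - 1) / s).toNat = ((b - s + s - 1) / s).toNat + 1 := by omega
  simp only [sub_zero, hb0, hb, if_pos, htn, List.range_succ_eq_map, List.map_cons, List.map_map]
  congr 1
  · simp
  · apply List.map_congr_left; intro k _; simp; ring

theorem pyRange_zero_neg (b s : Int) (hb : 0 ≤ b) (hs : s < 0) :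
    PySem.List.pyRange 0 b s = [] := by
  have h0 : ¬ (s = 0) := by omega
  have h1 : ¬ ((0:Int) < s) := by omega
  simp [PySem.List.pyRange, h0, h1]
  intro hb'; omega

theorem slice_chunk (tok : List Char) (j : Nat) (chunk : Int) (hc : 0 < chunk) :
    PySem.List.slice tok (some (j:Int)) (some ((j:Int) + chunk)) = (tok.drop j).take chunk.toNat := by
  have e : (j:Int) + chunk = ((j + chunk.toNat : Nat) : Int) := by push_cast; omega
  rw [e, PySem.List.slice_natCast]
  congr 1; omega

theorem joinSlices (chunk : Int) (hc : 1 ≤ chunk) : ∀ (n : Nat) (tok : List Char), tok.length = n → tok ≠ [] →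
    PySem.Chars.join [' ']
      ((PySem.List.pyRange 0 (tok.length : Int) chunk).map
        (fun i => PySem.List.slice tok (some i) (some (i + chunk))))
      = jc chunk.toNat tok chunk.toNat := by
  intro n
  induction n using Nat.strong_induction_on with
  | _ n ih =>
    intro tok hn hne
    have hpos : 0 < tok.length := List.length_pos_iff.mpr hne
    by_cases hle : (tok.length : Int) ≤ chunk
    · rw [pyRange_zero_singleton _ _ (by exact_mod_cast hpos) hle]
      have h0 : ((0:Nat):Int) = (0:Int) := rfl
      rw [List.map_singleton, PySem.Chars.join_singleton, ← h0, slice_chunk tok 0 chunk (by omega)]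
      simp only [List.drop_zero]
      rw [List.take_of_length_le (by omega), jc_of_le _ _ _ (by omega)]
    · have hlt : chunk < (tok.length : Int) := by omega
      rw [pyRange_zero_cons _ _ (by omega) hlt]
      rw [List.map_cons, List.map_map]
      -- head
      have hhead : PySem.List.slice tok (some 0) (some (0 + chunk)) = tok.take chunk.toNat := by
        have := slice_chunk tok 0 chunk (by omega)
        simpa using this
      -- tail map: shift
      have htail : ((PySem.List.pyRange 0 ((tok.length : Int) - chunk) chunk).map
            ((fun i => PySem.List.slice tok (some i) (some (i + chunk))) ∘ (· + chunk)))
          = (PySem.List.pyRange 0 (((tok.drop chunk.toNat).length : Int)) chunk).map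
            (fun i => PySem.List.slice (tok.drop chunk.toNat) (some i) (some (i + chunk))) := by
        have hlen : ((tok.drop chunk.toNat).length : Int) = (tok.length : Int) - chunk := by
          simp [List.length_drop]; omega
        rw [hlen]
        apply List.map_congr_left
        intro i hi
        have hi0 : 0 ≤ i := by
          have h3 := ((PySem.List.mem_pyRange_iff_of_pos (by omega : (0:Int) < chunk) i).mp hi)
          omega
        obtain ⟨j, rfl⟩ : ∃ j : Nat, i = (j : Int) := ⟨i.toNat, by omega⟩
        simp only [Function.comp_apply]
        rw [slice_chunk (tok.drop chunk.toNat) j chunk (by omega)]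
        have e1 : (j:Int) + chunk = ((j + chunk.toNat : Nat) : Int) := by push_cast; omega
        rw [e1, slice_chunk tok (j + chunk.toNat) chunk (by omega), List.drop_drop]
        congr 2
        omega
      rw [htail]
      have hdne : tok.drop chunk.toNat ≠ [] := by
        apply List.ne_nil_of_length_pos
        simp [List.length_drop]; omega
      have hIH := ih (tok.drop chunk.toNat).length (by simp [List.length_drop]; omega)
        (tok.drop chunk.toNat) rfl hdne
      have hmem : (0:Int) ∈ PySem.List.pyRange 0 (((tok.drop chunk.toNat).length : Int)) chunk := by
        rw [PySem.List.mem_pyRange_iff_of_pos (by omega : (0:Int) < chunk)]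
        refine ⟨le_refl _, ?_, by simp⟩
        have : 0 < (tok.drop chunk.toNat).length := List.length_pos_iff.mpr hdne
        exact_mod_cast this
      obtain ⟨y, rest, hyrest⟩ : ∃ y rest,
          (PySem.List.pyRange 0 (((tok.drop chunk.toNat).length : Int)) chunk).map
            (fun i => PySem.List.slice (tok.drop chunk.toNat) (some i) (some (i + chunk)))
          = y :: rest := by
        cases h : (PySem.List.pyRange 0 (((tok.drop chunk.toNat).length : Int)) chunk).map
            (fun i => PySem.List.slice (tok.drop chunk.toNat) (some i) (some (i + chunk))) with
        | nil =>
          exfalso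
          have := List.ne_nil_of_mem hmem
          rw [List.map_eq_nil_iff] at h
          exact this h
        | cons y rest => exact ⟨y, rest, rfl⟩
      rw [hhead, hyrest, PySem.Chars.join_cons_cons, ← hyrest, hIH]
      rw [jc_break chunk.toNat (by omega) tok chunk.toNat (le_refl _) (by omega)]
      simp

theorem splitTokenA_eq (chunk : Int) (hc : 1 ≤ chunk) (tok : List Char) :
    splitTokenA chunk tok = jc chunk.toNat tok chunk.toNat := by
  unfold splitTokenA
  by_cases hle : (tok.length : Int) ≤ chunk
  · rw [if_pos hle, jc_of_le _ _ _ (by omega)]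
  · rw [if_neg hle]
    exact joinSlices chunk hc tok.length tok rfl
      (by intro h; subst h; simp at hle; omega)

-- ===== B side =====
def scanB (chunk : Int) : List Char → Int → List Char
  | [], _ => []
  | c :: cs, r =>
    if c = ' ' then c :: scanB chunk cs 0
    else if r = chunk then ' ' :: c :: scanB chunk cs 1
    else c :: scanB chunk cs (r + 1)

theorem foldl_eq_scanB (chunk : Int) : ∀ (l : List Char) (out : List Char) (r : Int),
    (l.foldl
      (fun (st : List Char × Int) c =>
        if c = ' ' then (st.1 ++ [c], 0)
        else if st.2 = chunk then (st.1 ++ [' ', c], 1)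
        else (st.1 ++ [c], st.2 + 1))
      (out, r)).1 = out ++ scanB chunk l r := by
  intro l
  induction l with
  | nil => intro out r; simp [scanB]
  | cons c cs ih =>
    intro out r
    by_cases hc : c = ' '
    · subst hc; simp only [List.foldl_cons, scanB, ih]; simp
    · by_cases hr : r = chunk
      · subst hr
        simp only [List.foldl_cons, scanB, if_neg hc, ih]; simp
      · simp only [List.foldl_cons, scanB, if_neg hc, if_neg hr, ih]; simp

theorem scanB_append (chunk : Int) : ∀ (tok l : List Char) (r : Int),
    scanB chunk (tok ++ ' ' :: l) r = scanB chunk tok r ++ ' ' :: scanB chunk l 0 := by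
  intro tok
  induction tok with
  | nil => intro l r; simp [scanB]
  | cons c cs ih =>
    intro l r
    by_cases hc : c = ' '
    · subst hc; simp [scanB, ih]
    · by_cases hr : r = chunk
      · subst hr; simp [scanB, hc, ih]
      · simp [scanB, hc, hr, ih]

theorem scanB_token (chunk : Int) (hc : 1 ≤ chunk) : ∀ (tok : List Char), (' ' ∉ tok) → ∀ (r : Int),
    0 ≤ r → r ≤ chunk → scanB chunk tok r = jc chunk.toNat tok (chunk - r).toNat := by
  intro tok
  induction tok with
  | nil => intro _ r _ _; simp [scanB, jc]
  | cons c cs ih =>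
    intro hs r h0 h1
    have hcsp : c ≠ ' ' := by intro h; exact hs (by simp [h])
    have hcs : ' ' ∉ cs := fun h => hs (List.mem_cons_of_mem _ h)
    by_cases hr : r = chunk
    · have e : (chunk - r).toNat = 0 := by omega
      rw [e]
      simp only [scanB, if_neg hcsp, if_pos hr]
      rw [ih hcs 1 (by omega) (by omega)]
      have e2 : (chunk - 1).toNat = chunk.toNat - 1 := by omega
      rw [e2]
      simp [jc]
    · simp only [scanB, if_neg hcsp, if_neg hr]
      rw [ih hcs (r + 1) (by omega) (by omega)]
      obtain ⟨m, hm⟩ : ∃ m : Nat, (chunk - r).toNat = m + 1 := ⟨(chunk - r).toNat - 1, by omega⟩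
      rw [hm]
      simp only [jc]
      congr 2
      omega

theorem splitSp_nospace : ∀ (l : List Char), (' ' ∉ l) → splitSp l = (l, []) := by
  intro l
  induction l with
  | nil => intro _; rfl
  | cons c cs ih =>
    intro h
    have hc : c ≠ ' ' := fun hc => h (by simp [hc])
    simp [splitSp, hc, ih (fun hm => h (List.mem_cons_of_mem _ hm))]

theorem splitSp_append : ∀ (tok rest : List Char), (' ' ∉ tok) →
    splitSp (tok ++ ' ' :: rest) = (tok, (splitSp rest).1 :: (splitSp rest).2) := by
  intro tok
  induction tok with
  | nil => intro rest _; simp [splitSp]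
  | cons c cs ih =>
    intro rest h
    have hc : c ≠ ' ' := fun hc => h (by simp [hc])
    simp [splitSp, hc, ih rest (fun hm => h (List.mem_cons_of_mem _ hm))]

theorem exists_decomp : ∀ (l : List Char), ' ' ∈ l →
    ∃ tok rest, (' ' ∉ tok) ∧ l = tok ++ ' ' :: rest := by
  intro l
  induction l with
  | nil => intro h; simp at h
  | cons c cs ih =>
    intro h
    by_cases hc : c = ' '
    · exact ⟨[], cs, by simp, by simp [hc]⟩
    · have : ' ' ∈ cs := by
        rcases List.mem_cons.mp h with h1 | h1
        · exact absurd h1.symm hc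
        · exact h1
      obtain ⟨tok, rest, hn, he⟩ := ih this
      exact ⟨c :: tok, rest, by simp [hn]; exact fun h => hc h.symm, by simp [he]⟩

theorem main_pos (chunk : Int) (hc : 1 ≤ chunk) : ∀ (n : Nat) (t : List Char), t.length = n →
    PySem.Chars.join [' '] (((splitSp t).1 :: (splitSp t).2).map (splitTokenA chunk))
      = scanB chunk t 0 := by
  intro n
  induction n using Nat.strong_induction_on with
  | _ n ih =>
    intro t hn
    by_cases hsp : ' ' ∈ t
    · obtain ⟨tok, rest, hns, rfl⟩ := exists_decomp t hsp
      rw [splitSp_append tok rest hns, scanB_append]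
      simp only [List.map_cons, PySem.Chars.join_cons_cons]
      have hIH := ih rest.length (by simp at hn; omega) rest rfl
      simp only [List.map_cons] at hIH
      rw [hIH, splitTokenA_eq chunk hc tok,
        scanB_token chunk hc tok hns 0 (le_refl _) (by omega),
        show chunk - 0 = chunk from by ring]
      simp
    · rw [splitSp_nospace t hsp]
      simp only [List.map_cons, List.map_nil, PySem.Chars.join_singleton]
      rw [splitTokenA_eq chunk hc t, scanB_token chunk hc t hsp 0 (le_refl _) (by omega)]
      congr 1
      omega

theorem splitTokenA_nil (chunk : Int) : splitTokenA chunk [] = [] := by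
  unfold splitTokenA
  by_cases h : (0:Int) ≤ chunk
  · rw [if_pos (by simpa using h)]
  · rw [if_neg (by simp; omega)]
    rw [show ((([]:List Char).length :Int)) = 0 from by simp]
    rw [pyRange_zero_neg 0 chunk (le_refl _) (by omega)]
    simp [PySem.Chars.join_nil]

theorem main_allspace (chunk : Int) : ∀ (t : List Char), (∀ c ∈ t, c = ' ') →
    PySem.Chars.join [' '] (((splitSp t).1 :: (splitSp t).2).map (splitTokenA chunk)) = t := by
  intro t
  induction t with
  | nil =>
    intro _
    show PySem.Chars.join [' '] [splitTokenA chunk []] = []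
    rw [splitTokenA_nil, PySem.Chars.join_singleton]
  | cons c cs ih =>
    intro h
    have hc : c = ' ' := h c (by simp)
    subst hc
    have hcs := ih (fun c hm => h c (List.mem_cons_of_mem _ hm))
    show PySem.Chars.join [' ']
        (splitTokenA chunk [] :: ((splitSp cs).1 :: (splitSp cs).2).map (splitTokenA chunk))
      = ' ' :: cs
    obtain ⟨y, rest, hyr⟩ : ∃ y rest,
        ((splitSp cs).1 :: (splitSp cs).2).map (splitTokenA chunk) = y :: rest :=
      ⟨_, _, List.map_cons ..⟩
    rw [hyr, PySem.Chars.join_cons_cons, ← hyr, hcs, splitTokenA_nil]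
    simp

theorem scanB_allspace (chunk : Int) : ∀ (t : List Char) (r : Int), (∀ c ∈ t, c = ' ') →
    scanB chunk t r = t := by
  intro t
  induction t with
  | nil => intro r _; rfl
  | cons c cs ih =>
    intro r h
    have hc : c = ' ' := h c (by simp)
    subst hc
    simp [scanB, ih 0 (fun c hm => h c (List.mem_cons_of_mem _ hm))]

theorem scanB_neg (chunk : Int) (hc : chunk < 0) : ∀ (t : List Char) (r : Int), 0 ≤ r →
    scanB chunk t r = t := by
  intro t
  induction t with
  | nil => intro r _; rfl
  | cons c cs ih =>
    intro r hr
    by_cases h : c = ' '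
    · subst h; simp [scanB, ih 0 (le_refl _)]
    · simp only [scanB, if_neg h, if_neg (show ¬ r = chunk by omega)]
      rw [ih (r+1) (by omega)]

theorem splitTokenA_neg (chunk : Int) (hc : chunk < 0) (tok : List Char) :
    splitTokenA chunk tok = [] := by
  unfold splitTokenA
  rw [if_neg (by simp; omega), pyRange_zero_neg _ _ (by simp) hc]
  simp [PySem.Chars.join_nil]

theorem A_neg (chunk : Int) (hc : chunk < 0) : ∀ (t : List Char),
    PySem.Chars.join [' '] (((splitSp t).1 :: (splitSp t).2).map (splitTokenA chunk))
      = List.replicate (t.count ' ') ' ' := by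
  intro t
  induction t with
  | nil =>
    show PySem.Chars.join [' '] [splitTokenA chunk []] = _
    rw [splitTokenA_nil, PySem.Chars.join_singleton]
    simp
  | cons c cs ih =>
    by_cases h : c = ' '
    · subst h
      show PySem.Chars.join [' ']
          (splitTokenA chunk [] :: ((splitSp cs).1 :: (splitSp cs).2).map (splitTokenA chunk))
        = _
      obtain ⟨y, rest, hyr⟩ : ∃ y rest,
          ((splitSp cs).1 :: (splitSp cs).2).map (splitTokenA chunk) = y :: rest :=
        ⟨_, _, List.map_cons ..⟩
      rw [hyr, PySem.Chars.join_cons_cons, ← hyr, ih, splitTokenA_nil]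
      simp [List.replicate_succ]
    · have e : splitSp (c :: cs) = (c :: (splitSp cs).1, (splitSp cs).2) := by
        simp [splitSp, h]
      rw [e]
      simp only [List.map_cons]
      rw [splitTokenA_neg chunk hc]
      simp only [List.map_cons] at ih
      rw [splitTokenA_neg chunk hc] at ih
      rw [ih]
      simp [h]

theorem ports_eq (text : String) (chunk : Int)
    (h : PySem.Chars.join [' '] (((splitSp text.toList).1 :: (splitSp text.toList).2).map (splitTokenA chunk))
          = scanB chunk text.toList 0) :
    break_long_tokens_py text chunk = break_long_tokens_py_alt text chunk := by
  unfold break_long_tokens_py break_long_tokens_py_alt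
  rw [splitOn_eq, foldl_eq_scanB chunk text.toList [] 0, List.nil_append]
  rw [h]

-- ===== VERDICT (by name: the statement is the Claim_ definition above) =====
theorem break_long_tokens_py_spec : Claim_unchanged_break_long_tokens_py := by
  intro text chunk _ hpre
  unfold Spec_break_long_tokens_py
  intro hnd
  apply ports_eq text chunk
  by_cases h1 : 1 ≤ chunk
  · exact main_pos chunk h1 text.toList.length text.toList rfl
  · have hall : ∀ c ∈ text.toList, c = ' ' := by
      rcases hpre with h0 | h0
      · have hneg : chunk < 0 := by omega
        intro c hm
        by_contra hcne
        exact hnd ⟨hneg, List.any_eq_true.mpr ⟨c, hm, by simpa using hcne⟩⟩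
      · intro c hm
        simpa using List.all_eq_true.mp h0 c hm
    rw [main_allspace chunk text.toList hall, scanB_allspace chunk text.toList 0 hall]

theorem break_long_tokens_py_changed : Claim_changed_break_long_tokens_py := by
  unfold Claim_changed_break_long_tokens_py; decide

theorem break_long_tokens_py_tight : Claim_exact_break_long_tokens_py := by
  intro text chunk _ _ hd heq
  obtain ⟨hneg, hany⟩ := hd
  unfold break_long_tokens_py break_long_tokens_py_alt at heq
  rw [splitOn_eq, foldl_eq_scanB chunk text.toList [] 0, List.nil_append,
    A_neg chunk hneg, scanB_neg chunk hneg text.toList 0 (le_refl _)] at heq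
  have hl : List.replicate (text.toList.count ' ') ' ' = text.toList := by
    have := congrArg String.toList heq
    simpa [String.toList_ofList] using this
  obtain ⟨c, hm, hcne⟩ := List.any_eq_true.mp hany
  rw [← hl] at hm
  have : c = ' ' := List.eq_of_mem_replicate hm
  simp [this] at hcne
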